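-- pv_equiv track=rewrite | github.com/msick2/philips | test05.py | decode_byte_data
-- ===== SOURCE A (Python) =====
-- def decode_byte_data(data_array):
--     ret_list = list()
--
--     front = 0
--     flag_ = 0
--     for byte_data in data_array:
--         if flag_ == 0:
--             front = byte_data * 256
--             flag_ = 1
--         else:
--             flag_ = 0
--             ret_list.append(front + byte_data)
--
--     return ret_list
-- ===== SOURCE B (Python) =====
-- def decode_byte_data(data_array):
--     it = iter(data_array)
--     return [hi * 256 + lo for hi, lo in zip(it, it)]
-- ===== Notes on version B (the rewrite author's own statement) =====
-- stated objective: idiomatic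
-- what changed: Replaced the flag-based state machine (front/flag_ accumulators) with explicit pairwise grouping via zip over a single iterator in a comprehension.
import Mathlib
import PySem

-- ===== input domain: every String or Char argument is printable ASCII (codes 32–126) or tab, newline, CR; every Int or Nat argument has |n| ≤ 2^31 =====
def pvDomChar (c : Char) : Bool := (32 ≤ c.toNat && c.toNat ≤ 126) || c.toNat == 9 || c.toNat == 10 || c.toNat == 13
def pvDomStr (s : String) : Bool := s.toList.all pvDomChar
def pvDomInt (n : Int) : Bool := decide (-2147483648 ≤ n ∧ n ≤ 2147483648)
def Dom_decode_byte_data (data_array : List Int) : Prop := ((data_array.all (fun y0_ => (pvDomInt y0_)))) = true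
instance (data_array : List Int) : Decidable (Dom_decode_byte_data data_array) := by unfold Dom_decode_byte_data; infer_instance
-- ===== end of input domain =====

-- B replaces A's flag-based state machine with pairwise grouping (zip over one iterator) — more idiomatic, same cost.

-- ===== PORT A =====
-- A: loop with state (ret_list, front, flag_); flag_ toggles between storing hi*256 and appending hi*256+lo.
def decode_byte_data (data_array : List Int) : List Int :=
  (data_array.foldl
    (fun (st : List Int × Int × Int) byte_data =>
      let ret := st.1; let front := st.2.1; let flag_ := st.2.2
      if flag_ = 0 then (ret, byte_data * 256, 1)
      else (ret ++ [front + byte_data], front, 0))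
    ([], 0, 0)).1

-- ===== PORT B =====
-- zip(it, it) over one shared iterator: pair consecutive elements, dropping a trailing odd byte.
def pvPairUp (l : List Int) : List (Int × Int) :=
  match l with
  | a :: b :: rest => (a, b) :: pvPairUp rest
  | _ => []

def decode_byte_data_alt (data_array : List Int) : List Int :=
  (pvPairUp data_array).map (fun p => p.1 * 256 + p.2)

-- ===== PRECONDITION & SPEC =====
def Spec_decode_byte_data (data_array : List Int) (out : List Int) : Prop := out = decode_byte_data_alt data_array
instance (data_array : List Int) (out : List Int) : Decidable (Spec_decode_byte_data data_array out) := by unfold Spec_decode_byte_data; infer_instance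

-- ===== CLAIM (what is proved, stated in full; the proofs are below) =====
def Claim_equal_decode_byte_data : Prop := ∀ (data_array : List Int), Dom_decode_byte_data data_array → Spec_decode_byte_data data_array (decode_byte_data data_array)

-- ===== LEMMAS AND PROOFS =====

theorem decode_foldl_inv (l : List Int) : ∀ (ret : List Int) (front : Int),
    (l.foldl
      (fun (st : List Int × Int × Int) byte_data =>
        let r := st.1; let f := st.2.1; let fl := st.2.2
        if fl = 0 then (r, byte_data * 256, 1)
        else (r ++ [f + byte_data], f, 0))
      (ret, front, 0)).1
    = ret ++ (pvPairUp l).map (fun p => p.1 * 256 + p.2) := by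
  induction l using pvPairUp.induct with
  | case1 a b rest ih =>
      intro ret front
      simp [List.foldl, pvPairUp, ih]
  | case2 l h1 =>
      intro ret front
      rcases l with _ | ⟨a, rest⟩
      · simp [pvPairUp]
      · rcases rest with _ | ⟨b, r⟩
        · simp [List.foldl, pvPairUp]
        · exact absurd rfl (h1 a b r)

-- ===== VERDICT (by name: the statement is the Claim_ definition above) =====
theorem decode_byte_data_spec : Claim_equal_decode_byte_data := by
  intro data_array _
  unfold Spec_decode_byte_data decode_byte_data decode_byte_data_alt
  simpa using decode_foldl_inv data_array [] 0
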